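-- pv_equiv track=rewrite | github.com/ghkdemrdus/CodingTest_In_Programmers | 1주차/L2_멀리뛰기/Solution_조하담.py | solution
-- ===== SOURCE A (Python) =====
-- def solution(n):
--     from math import factorial
--
--     answer = 1
--     sets = n // 2
--
--     for set_count in range(1, sets+1):
--         single_count = n - 2*set_count
--         bunja = factorial(set_count+single_count)
--         bunmo = (factorial(set_count) * factorial(single_count))
--         answer += bunja // bunmo
--
--     return answer % 1234567
-- ===== SOURCE B (Python) =====
-- def solution(n):
--     a, b = 1, 1
--     for _ in range(n):
--         a, b = b, (a + b) % 1234567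
--     return a
-- ===== Notes on version B (the rewrite author's own statement) =====
-- stated objective: faster
-- what changed: Replaces the loop that computes a huge-integer factorial binomial C(n-k,k) for every k up to n/2 by the iterative Fibonacci recurrence a,b = b,(a+b) % 1234567.
import Mathlib
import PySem

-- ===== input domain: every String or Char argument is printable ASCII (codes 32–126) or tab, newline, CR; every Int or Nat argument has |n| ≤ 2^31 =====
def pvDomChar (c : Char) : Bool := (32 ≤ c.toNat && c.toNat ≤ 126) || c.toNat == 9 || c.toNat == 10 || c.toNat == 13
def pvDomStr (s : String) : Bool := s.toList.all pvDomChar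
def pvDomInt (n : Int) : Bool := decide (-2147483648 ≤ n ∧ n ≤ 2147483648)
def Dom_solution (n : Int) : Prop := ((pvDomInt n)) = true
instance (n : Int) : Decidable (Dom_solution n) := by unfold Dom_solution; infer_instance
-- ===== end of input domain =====

-- B replaces A's per-term factorial binomial summation by the iterative
-- Fibonacci recurrence mod 1234567 (objective: faster).

-- ===== PORT A =====
-- math.factorial; exact for k ≥ 0, and A only calls it on nonnegative arguments
-- (set_count ≥ 1 and single_count = n - 2*set_count ≥ 0 since set_count ≤ n // 2).
def intFactorial (k : Int) : Int := (Nat.factorial k.toNat : Int)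

def solution (n : Int) : Int :=
  let sets := PySem.Int.floordiv n 2
  let answer := (PySem.List.pyRange 1 (sets + 1) 1).foldl
    (fun answer set_count =>
      let single_count := n - 2 * set_count
      let bunja := intFactorial (set_count + single_count)
      let bunmo := intFactorial set_count * intFactorial single_count
      answer + PySem.Int.floordiv bunja bunmo) 1
  PySem.Int.mod answer 1234567

-- ===== PORT B =====
def solution_alt (n : Int) : Int :=
  ((PySem.List.pyRange 0 n 1).foldl
    (fun (p : Int × Int) _ => (p.2, PySem.Int.mod (p.1 + p.2) 1234567)) (1, 1)).1

-- ===== PRECONDITION & SPEC =====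
def Spec_solution (n : Int) (out : Int) : Prop := out = solution_alt n
instance (n : Int) (out : Int) : Decidable (Spec_solution n out) := by unfold Spec_solution; infer_instance

-- ===== CLAIM (what is proved, stated in full; the proofs are below) =====
def Claim_equal_solution : Prop := ∀ (n : Int), Dom_solution n → Spec_solution n (solution n)

-- ===== LEMMAS AND PROOFS =====

-- B's loop state after j steps is (fib(a+1+j) % M, fib(a+2+j) % M); the element is ignored.
lemma alt_fold (l : List Int) : ∀ (a : Nat),
    l.foldl (fun (p : Int × Int) _ => (p.2, PySem.Int.mod (p.1 + p.2) 1234567))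
      (((Nat.fib (a+1) % 1234567 : Nat) : Int), ((Nat.fib (a+2) % 1234567 : Nat) : Int))
    = (((Nat.fib (a+1+l.length) % 1234567 : Nat) : Int), ((Nat.fib (a+2+l.length) % 1234567 : Nat) : Int)) := by
  induction l with
  | nil => intro a; simp
  | cons x t ih =>
    intro a
    have hm : PySem.Int.mod (((Nat.fib (a+1) % 1234567 : Nat) : Int) + ((Nat.fib (a+2) % 1234567 : Nat) : Int)) 1234567
        = ((Nat.fib (a+3) % 1234567 : Nat) : Int) := by
      rw [PySem.Int.mod_eq_emod_of_pos (by norm_num : (0:Int) < 1234567)]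
      have hf : Nat.fib (a+3) = Nat.fib (a+1) + Nat.fib (a+2) := by
        rw [show a+3 = (a+1)+2 from rfl, Nat.fib_add_two]
      push_cast [hf]
      rw [Int.add_emod]
      norm_num [Int.emod_emod_of_dvd]
    simp only [List.foldl_cons, List.length_cons]
    rw [hm]
    have h := ih (a+1)
    rw [show a+1+1 = a+2 from by omega, show a+1+2 = a+3 from by omega] at h
    rw [show a+1+(t.length+1) = a+2+t.length from by omega,
        show a+2+(t.length+1) = a+3+t.length from by omega]
    exact h

lemma alt_eq_fib (m : Nat) : solution_alt (m : Int) = ((Nat.fib (m+1) % 1234567 : Nat) : Int) := by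
  simp only [solution_alt]
  have h0 := alt_fold (PySem.List.pyRange 0 (m : Int) 1) 0
  have hl : (PySem.List.pyRange 0 (m : Int) 1).length = m := by
    rw [PySem.List.length_pyRange_one]; omega
  rw [hl] at h0
  rw [show ((Nat.fib (0+1) % 1234567 : Nat) : Int) = 1 from by decide,
      show ((Nat.fib (0+2) % 1234567 : Nat) : Int) = 1 from by decide,
      show (0:Nat)+1+m = m+1 from by omega, show (0:Nat)+2+m = m+2 from by omega] at h0
  rw [h0]

-- the diagonal binomial sum: fib(m+1) = 1 + Σ_{k=1..m/2} C(m-k,k)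
lemma fib_diag (m : Nat) :
    Nat.fib (m+1) = 1 + ∑ k ∈ Finset.range (m/2), Nat.choose (m - (k+1)) (k+1) := by
  calc Nat.fib (m+1)
      = ∑ k ∈ Finset.range (m+1), Nat.choose k (m-k) := by
        rw [Nat.fib_succ_eq_sum_choose,
            Finset.Nat.sum_antidiagonal_eq_sum_range_succ (fun i j => Nat.choose i j) m]
    _ = ∑ k ∈ Finset.range (m+1), Nat.choose (m-k) k := by
        rw [← Finset.sum_range_reflect (fun k => Nat.choose k (m-k)) (m+1)]
        refine Finset.sum_congr rfl ?_
        intro j hj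
        simp only [Finset.mem_range] at hj
        congr 1; omega
    _ = ∑ k ∈ Finset.range (m/2+1), Nat.choose (m-k) k := by
        symm
        apply Finset.sum_subset
        · intro x hx
          simp only [Finset.mem_range] at hx ⊢
          omega
        intro x hx hx2
        simp only [Finset.mem_range] at hx hx2
        exact Nat.choose_eq_zero_of_lt (by omega)
    _ = 1 + ∑ k ∈ Finset.range (m/2), Nat.choose (m-(k+1)) (k+1) := by
        rw [Finset.sum_range_succ']
        simp [Nat.add_comm]

lemma a_eq_fib (m : Nat) : solution (m : Int) = ((Nat.fib (m+1) % 1234567 : Nat) : Int) := by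
  simp only [solution]
  have hsets : PySem.Int.floordiv (m : Int) 2 = ((m / 2 : Nat) : Int) := by
    exact_mod_cast PySem.Int.floordiv_natCast m 2
  rw [hsets, PySem.List.foldl_add, PySem.List.pyRange_one, List.map_map]
  rw [show ((((m / 2 : Nat) : Int)) + 1 - 1).toNat = m / 2 from by omega]
  have hterm : ∀ k ∈ List.range (m/2),
      ((fun set_count =>
        PySem.Int.floordiv (intFactorial (set_count + ((m : Int) - 2 * set_count)))
          (intFactorial set_count * intFactorial ((m : Int) - 2 * set_count))) ∘
        (fun k : Nat => (1 : Int) + (k : Int))) k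
      = ((Nat.choose (m - (k+1)) (k+1) : Nat) : Int) := by
    intro k hk
    simp only [List.mem_range] at hk
    have h2k : 2 * (k + 1) ≤ m := by omega
    simp only [Function.comp, intFactorial]
    rw [show ((1:Int) + (k:Int) + ((m : Int) - 2 * ((1:Int) + (k:Int)))).toNat = m - (k+1) from by omega,
        show ((1:Int) + (k:Int)).toNat = k + 1 from by omega,
        show (((m : Int)) - 2 * ((1:Int) + (k:Int))).toNat = m - 2*(k+1) from by omega]
    have hden : (0:Int) < (Nat.factorial (k+1) : Int) * (Nat.factorial (m - 2*(k+1)) : Int) := by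
      exact_mod_cast Nat.mul_pos (Nat.factorial_pos _) (Nat.factorial_pos _)
    rw [PySem.Int.floordiv_eq_ediv_of_pos hden]
    have hfact : Nat.factorial (m - (k+1))
        = Nat.choose (m - (k+1)) (k+1) * Nat.factorial (k+1) * Nat.factorial (m - 2*(k+1)) := by
      have h := Nat.choose_mul_factorial_mul_factorial (show k+1 ≤ m - (k+1) by omega)
      rw [show m - (k+1) - (k+1) = m - 2*(k+1) from by omega] at h
      exact h.symm
    rw [hfact]
    push_cast
    rw [mul_assoc, Int.mul_ediv_cancel _ hden.ne']
  rw [List.map_congr_left hterm]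
  have hsum : ∀ j : Nat, ((List.range j).map (fun k => ((Nat.choose (m - (k+1)) (k+1) : Nat) : Int))).sum
      = ((∑ k ∈ Finset.range j, Nat.choose (m - (k+1)) (k+1) : Nat) : Int) := by
    intro j
    induction j with
    | zero => simp
    | succ i ih =>
      rw [List.range_succ, Finset.sum_range_succ]
      simp only [List.map_append, List.sum_append, List.map_cons, List.map_nil,
        List.sum_cons, List.sum_nil]
      rw [ih]
      push_cast
      ring
  rw [hsum (m/2), PySem.Int.mod_eq_emod_of_pos (by norm_num : (0:Int) < 1234567)]
  rw [fib_diag m]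
  push_cast
  ring_nf

lemma neg_case (n : Int) (hn : n < 0) : solution n = 1 ∧ solution_alt n = 1 := by
  constructor
  · simp only [solution]
    have hneg : PySem.Int.floordiv n 2 < 0 := by
      by_contra h
      have h2 := (PySem.Int.le_floordiv_iff_mul_le (by norm_num : (0:Int) < 2)).mp (not_lt.mp h)
      omega
    rw [PySem.List.pyRange_one_eq_nil (by omega)]
    simp only [List.foldl_nil]
    decide
  · simp only [solution_alt]
    rw [PySem.List.pyRange_one_eq_nil (by omega)]
    simp

-- ===== VERDICT (by name: the statement is the Claim_ definition above) =====
theorem solution_spec : Claim_equal_solution := by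
  intro n _
  unfold Spec_solution
  rcases lt_or_ge n 0 with hn | hn
  · obtain ⟨h1, h2⟩ := neg_case n hn
    rw [h1, h2]
  · obtain ⟨m, rfl⟩ := Int.eq_ofNat_of_zero_le hn
    rw [a_eq_fib m, alt_eq_fib m]
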